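-- pv_equiv track=rewrite | github.com/riyuna/problem-solving | atcoder/ARC169/C.py | check
-- ===== SOURCE A (Python) =====
-- def check(L):
-- 	for i in range(len(L)):
-- 		if L[i]>0 and i+L[i]<len(L):
-- 			check=True
-- 			for j in range(i+1, i+L[i]+1):
-- 				if L[j]!=L[i]:
-- 					check=False
-- 					break
-- 			if check:return True
-- 	return False
-- ===== SOURCE B (Python) =====
-- def check(L):
--     run = []
--     prev = None
--     for x in reversed(L):
--         run.append(run[-1] + 1 if x == prev else 1)
--         prev = x
--     run.reverse()
--     return any(v > 0 and r > v for v, r in zip(L, run))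
-- ===== Notes on version B (the rewrite author's own statement) =====
-- stated objective: alternative
-- what changed: Replaces the per-index inner scan of the next L[i] elements by a single back-to-front pass computing run-lengths of equal consecutive values, then one O(1) test per index (run[i] > L[i]); on random inputs A's inner scans are short, so a timing run showed no speed-up.
import Mathlib
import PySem

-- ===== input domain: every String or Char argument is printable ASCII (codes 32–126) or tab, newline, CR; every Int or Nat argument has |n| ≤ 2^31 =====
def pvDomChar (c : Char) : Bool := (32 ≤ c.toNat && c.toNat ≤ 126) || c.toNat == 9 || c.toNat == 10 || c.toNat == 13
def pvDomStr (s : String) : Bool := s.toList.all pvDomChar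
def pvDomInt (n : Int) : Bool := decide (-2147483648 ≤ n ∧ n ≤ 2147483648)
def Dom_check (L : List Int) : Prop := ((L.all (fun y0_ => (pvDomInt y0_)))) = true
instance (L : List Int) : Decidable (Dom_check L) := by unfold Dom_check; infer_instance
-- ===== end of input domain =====

-- B replaces A's per-index rescans by one linear run-length pass with an O(1) test per index (alternative algorithm).

-- ===== PORT A =====
-- inner 'for j in range(i+1, i+L[i]+1): if L[j]!=L[i]: check=False; break'
def checkInnerA (L : List Int) (v : Int) : List Int → Bool
  | [] => true
  | j :: rest =>
    if PySem.List.pyGet? L j ≠ some v then false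
    else checkInnerA L v rest

-- outer 'for i in range(len(L))'
def checkOuterA (L : List Int) : List Int → Bool
  | [] => false
  | i :: rest =>
    match PySem.List.pyGet? L i with
    | none => checkOuterA L rest   -- unreachable: i comes from range(len(L))
    | some v =>
      if v > 0 ∧ i + v < (L.length : Int) then
        if checkInnerA L v (PySem.List.pyRange (i + 1) (i + v + 1) 1) then true
        else checkOuterA L rest
      else checkOuterA L rest

def check (L : List Int) : Bool :=
  checkOuterA L (PySem.List.pyRange 0 (L.length : Int) 1)

-- ===== PORT B =====
-- run[i] = number of consecutive equal values starting at i (computed back to front in Source B;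
-- here the same recurrence, run over the tail first)
def runList : List Int → List Nat
  | [] => []
  | x :: rest =>
    let r := runList rest
    (match rest with
     | [] => 1
     | y :: _ => if x == y then r.headD 0 + 1 else 1) :: r

def check_alt (L : List Int) : Bool :=
  (L.zip (runList L)).any (fun p => p.1 > 0 && (p.2 : Int) > p.1)

-- ===== PRECONDITION & SPEC =====
def Spec_check (L : List Int) (out : Bool) : Prop := out = check_alt L
instance (L : List Int) (out : Bool) : Decidable (Spec_check L out) := by unfold Spec_check; infer_instance

-- ===== CLAIM (what is proved, stated in full; the proofs are below) =====
def Claim_equal_check : Prop := ∀ (L : List Int), Dom_check L → Spec_check L (check L)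

-- ===== LEMMAS AND PROOFS =====

def leadCount (v : Int) : List Int → Nat
  | [] => 0
  | y :: t => if y = v then 1 + leadCount v t else 0

theorem leadCount_le_length (v : Int) (M : List Int) : leadCount v M ≤ M.length := by
  induction M with
  | nil => simp [leadCount]
  | cons y t ih => simp only [leadCount, List.length_cons]; split <;> omega

theorem leadCount_ge_iff (v : Int) (M : List Int) (m : Nat) :
    m ≤ leadCount v M ↔ m ≤ M.length ∧ ∀ k < m, M[k]? = some v := by
  induction M generalizing m with
  | nil =>
    simp only [leadCount, List.length_nil, Nat.le_zero]
    constructor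
    · rintro rfl; exact ⟨rfl, by omega⟩
    · rintro ⟨rfl, _⟩; rfl
  | cons y t ih =>
    cases m with
    | zero => simp
    | succ m' =>
      simp only [leadCount, List.length_cons]
      split
      · rename_i hy
        subst hy
        rw [show m' + 1 ≤ 1 + leadCount y t ↔ m' ≤ leadCount y t by omega, ih]
        constructor
        · rintro ⟨h1, h2⟩
          refine ⟨by omega, ?_⟩
          intro k hk
          cases k with
          | zero => simp
          | succ k' => simpa using h2 k' (by omega)
        · rintro ⟨h1, h2⟩
          refine ⟨by omega, ?_⟩
          intro k hk
          simpa using h2 (k + 1) (by omega)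
      · rename_i hy
        constructor
        · omega
        · rintro ⟨_, h2⟩
          have := h2 0 (by omega)
          simp at this
          exact absurd this hy

def specB : List Int → Bool
  | [] => false
  | x :: rest => (decide (x > 0) && decide ((leadCount x rest : Int) ≥ x)) || specB rest

theorem runList_cons (x : Int) (rest : List Int) :
    runList (x :: rest) = (leadCount x rest + 1) :: runList rest := by
  induction rest generalizing x with
  | nil => simp [runList, leadCount]
  | cons y t ih =>
    show (if x == y then (runList (y :: t)).headD 0 + 1 else 1) :: runList (y :: t) = _
    rw [ih y]
    by_cases hxy : x = y
    · subst hxy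
      simp [leadCount]
      omega
    · have hb : (x == y) = false := beq_eq_false_iff_ne.mpr hxy
      simp [hb, leadCount, Ne.symm hxy]

theorem check_alt_eq_specB (L : List Int) : check_alt L = specB L := by
  induction L with
  | nil => rfl
  | cons x rest ih =>
    simp only [check_alt, specB, runList_cons, List.zip_cons_cons, List.any_cons] at *
    rw [ih.symm]
    congr 1
    by_cases hx : x > 0
    · simp only [hx, decide_true, Bool.true_and]
      exact decide_eq_decide.mpr (by push_cast; omega)
    · simp [hx]

theorem checkInnerA_eq_all (L : List Int) (v : Int) (js : List Int) :
    checkInnerA L v js = js.all (fun j => PySem.List.pyGet? L j == some v) := by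
  induction js with
  | nil => rfl
  | cons j rest ih =>
    simp only [checkInnerA, List.all_cons]
    split
    · rename_i h
      simp [beq_eq_false_iff_ne.mpr h]
    · rename_i h
      rw [not_not] at h
      simp [h, ih]

theorem outer_eq (L : List Int) (n : Nat) : ∀ p : Nat, p + n = L.length →
    checkOuterA L (PySem.List.pyRange (p : Int) (L.length : Int) 1) = specB (L.drop p) := by
  induction n with
  | zero =>
    intro p hp
    rw [PySem.List.pyRange_one_eq_nil (by omega)]
    rw [List.drop_of_length_le (by omega)]
    rfl
  | succ n ih =>
    intro p hp
    have hplt : p < L.length := by omega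
    rw [PySem.List.pyRange_one_cons (by exact_mod_cast hplt)]
    have hget : PySem.List.pyGet? L (p : Int) = some L[p] := by
      rw [PySem.List.pyGet?_natCast, List.getElem?_eq_getElem hplt]
    have hdrop : L.drop p = L[p] :: L.drop (p + 1) := by
      rw [List.drop_eq_getElem_cons hplt]
    have hrec : checkOuterA L (PySem.List.pyRange ((p : Int) + 1) (L.length : Int) 1) = specB (L.drop (p + 1)) := by
      have h := ih (p + 1) (by omega)
      rw [show ((p : Int) + 1) = ((p + 1 : Nat) : Int) by push_cast; ring]
      exact h
    set v := L[p] with hv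
    rw [checkOuterA, hget, hdrop]
    simp only [specB]
    have hlenD : (L.drop (p + 1)).length = L.length - (p + 1) := by simp
    by_cases hv0 : v > 0
    · have hkey : ∀ (_ : (p : Int) + v < (L.length : Int)),
          checkInnerA L v (PySem.List.pyRange ((p : Int) + 1) ((p : Int) + v + 1) 1)
            = decide ((leadCount v (L.drop (p + 1)) : Int) ≥ v) := by
        intro hvlen
        rw [checkInnerA_eq_all, PySem.List.pyRange_one]
        have hsub : ((p : Int) + v + 1 - ((p : Int) + 1)).toNat = v.toNat := by omega
        rw [hsub]
        have hidx : ∀ k : Nat, PySem.List.pyGet? L ((p : Int) + 1 + (k : Int)) = (L.drop (p + 1))[k]? := by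
          intro k
          rw [show (p : Int) + 1 + (k : Int) = ((p + 1 + k : Nat) : Int) by push_cast; ring,
            PySem.List.pyGet?_natCast, ← List.getElem?_drop]
        by_cases hall : ∀ k < v.toNat, (L.drop (p + 1))[k]? = some v
        · have h1 : ((List.range v.toNat).map (fun k : Nat => (p : Int) + 1 + (k : Int))).all
              (fun j => PySem.List.pyGet? L j == some v) = true := by
            rw [List.all_eq_true]
            intro j hj
            obtain ⟨k, hk, rfl⟩ := List.mem_map.mp hj
            rw [hidx k]
            exact beq_iff_eq.mpr (hall k (List.mem_range.mp hk))
          rw [h1]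
          have h2 : v.toNat ≤ leadCount v (L.drop (p + 1)) := by
            rw [leadCount_ge_iff]
            exact ⟨by omega, hall⟩
          symm; rw [decide_eq_true_iff]; omega
        · push Not at hall
          obtain ⟨k, hk1, hk2⟩ := hall
          have h1 : ((List.range v.toNat).map (fun k : Nat => (p : Int) + 1 + (k : Int))).all
              (fun j => PySem.List.pyGet? L j == some v) = false := by
            rw [List.all_eq_false]
            refine ⟨(p : Int) + 1 + (k : Int), List.mem_map.mpr ⟨k, List.mem_range.mpr hk1, rfl⟩, ?_⟩
            rw [hidx k]
            simpa using hk2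
          rw [h1]
          symm; rw [decide_eq_false_iff_not]
          intro hge
          have h2 : v.toNat ≤ leadCount v (L.drop (p + 1)) := by omega
          rw [leadCount_ge_iff] at h2
          exact hk2 (h2.2 k hk1)
      by_cases hvlen : (p : Int) + v < (L.length : Int)
      · rw [if_pos ⟨hv0, hvlen⟩, hkey hvlen, hrec]
        by_cases hge : (leadCount v (L.drop (p + 1)) : Int) ≥ v
        · simp [hge, hv0]
        · simp [hge, hv0]
      · rw [if_neg (by tauto), hrec]
        have hle : leadCount v (L.drop (p + 1)) ≤ (L.drop (p + 1)).length := leadCount_le_length _ _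
        have hnge : ¬ ((leadCount v (L.drop (p + 1)) : Int) ≥ v) := by
          rw [hlenD] at hle
          omega
        simp [hnge]
    · rw [if_neg (by tauto), hrec]
      simp [hv0]

theorem check_eq_alt : ∀ (L : List Int), check L = check_alt L := by
  intro L
  rw [check_alt_eq_specB, check]
  have h := outer_eq L L.length 0 (by omega)
  simpa using h

-- ===== VERDICT (by name: the statement is the Claim_ definition above) =====
theorem check_spec : Claim_equal_check := by
  intro L _
  exact check_eq_alt L
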